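-- pv_equiv track=rewrite | github.com/yowatanabe/learn-to-code | python/229/main.py | longest_even_sum_subarray
-- ===== SOURCE A (Python) =====
-- from typing import List
--
-- def longest_even_sum_subarray(nums: List[int]) -> int:
--     """
--     アプローチ:
--     - 累積和を使って偶奇だけを管理する。
--     - 偶数/奇数の最初の出現位置を記録。
--     - 同じ偶奇が再び出た場合、その間の部分配列は偶数和。
--     """
--     n = len(nums)
--     prefix_parity = 0  # 0=偶数, 1=奇数
--     first_occurrence = {0: -1}  # parity: index
--     max_len = 0
--
--     for i, num in enumerate(nums):
--         prefix_parity = (prefix_parity + num) % 2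
--         if prefix_parity in first_occurrence:
--             max_len = max(max_len, i - first_occurrence[prefix_parity])
--         else:
--             first_occurrence[prefix_parity] = i
--
--     return max_len
-- ===== SOURCE B (Python) =====
-- from typing import List
--
-- def longest_even_sum_subarray(nums: List[int]) -> int:
--     # One scan: track total parity and the first/last odd element positions.
--     # Even total (incl. empty) -> whole array; odd total -> drop through the
--     # first odd element, or drop from the last odd element on, whichever is longer.
--     n = len(nums)
--     first_odd = -1
--     last_odd = -1
--     parity = 0
--     for i, num in enumerate(nums):
--         if num % 2 != 0:
--             parity = 1 - parity
--             if first_odd == -1: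
--                 first_odd = i
--             last_odd = i
--     if parity == 0:
--         return n
--     return max(n - first_odd - 1, last_odd)
-- ===== Notes on version B (the rewrite author's own statement) =====
-- stated objective: simpler
-- what changed: Replaces the prefix-parity dictionary with first-occurrence bookkeeping and a running max by a single scan recording total parity and the first/last odd element indices, returning n for even total and max(n-first_odd-1, last_odd) otherwise.
import Mathlib
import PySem

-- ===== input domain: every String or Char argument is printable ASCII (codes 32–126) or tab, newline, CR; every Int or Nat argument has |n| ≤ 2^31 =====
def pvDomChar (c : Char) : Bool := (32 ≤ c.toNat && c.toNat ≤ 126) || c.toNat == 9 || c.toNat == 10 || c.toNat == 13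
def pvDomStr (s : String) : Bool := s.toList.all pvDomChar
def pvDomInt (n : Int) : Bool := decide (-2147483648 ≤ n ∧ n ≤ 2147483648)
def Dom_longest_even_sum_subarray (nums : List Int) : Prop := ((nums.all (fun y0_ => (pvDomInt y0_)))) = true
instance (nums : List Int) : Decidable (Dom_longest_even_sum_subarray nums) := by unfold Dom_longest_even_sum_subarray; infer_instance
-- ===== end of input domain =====

-- B replaces A's prefix-parity dictionary pass by a single scan for the first/last
-- odd element and a parity case analysis; no per-element dict/max work (measured faster).

-- ===== PORT A =====
-- loop body of A's for-loop (state: prefix_parity, first_occurrence, max_len)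
def stepA (s : Int × PySem.Dict Int Int × Int) (p : Int × Int) :
    Int × PySem.Dict Int Int × Int :=
  let pp := PySem.Int.mod (s.1 + p.2) 2
  if (s.2.1).contains pp then
    -- 'first_occurrence[prefix_parity]': the key is present here, so getD's default is never used
    (pp, s.2.1, max s.2.2 (p.1 - (s.2.1).getD pp 0))
  else
    (pp, (s.2.1).insert pp p.1, s.2.2)

def longest_even_sum_subarray (nums : List Int) : Int :=
  let _n : Int := nums.length   -- A computes n = len(nums) but never uses it
  ((PySem.List.enumerate nums).foldl stepA
      ((0 : Int), PySem.Dict.empty.insert 0 (-1), (0 : Int))).2.2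

-- ===== PORT B =====
-- loop body of B's for-loop (state: first_odd, last_odd, parity)
def stepB (s : Int × Int × Int) (p : Int × Int) : Int × Int × Int :=
  if PySem.Int.mod p.2 2 ≠ 0 then
    ((if s.1 = -1 then p.1 else s.1), p.1, 1 - s.2.2)
  else s

def longest_even_sum_subarray_alt (nums : List Int) : Int :=
  let n : Int := nums.length
  let st := (PySem.List.enumerate nums).foldl stepB ((-1 : Int), (-1 : Int), (0 : Int))
  if st.2.2 = 0 then n else max (n - st.1 - 1) st.2.1

-- ===== PRECONDITION & SPEC =====
def Spec_longest_even_sum_subarray (nums : List Int) (out : Int) : Prop := out = longest_even_sum_subarray_alt nums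
instance (nums : List Int) (out : Int) : Decidable (Spec_longest_even_sum_subarray nums out) := by unfold Spec_longest_even_sum_subarray; infer_instance

-- ===== CLAIM (what is proved, stated in full; the proofs are below) =====
def Claim_equal_longest_even_sum_subarray : Prop := ∀ (nums : List Int), Dom_longest_even_sum_subarray nums → Spec_longest_even_sum_subarray nums (longest_even_sum_subarray nums)

-- ===== LEMMAS AND PROOFS =====

-- the dict A's loop maintains, as a function of B's first_odd value
def dictOf (f : Int) : PySem.Dict Int Int :=
  if f = -1 then PySem.Dict.empty.insert 0 (-1)
  else (PySem.Dict.empty.insert 0 (-1)).insert 1 f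

-- the common closed form of both results
def rOf (n f l p : Int) : Int := if p = 0 then n else max (n - f - 1) l

theorem main_inv (xs : List Int) :
    (List.foldl stepA ((0 : Int), PySem.Dict.empty.insert 0 (-1), (0 : Int))
        (PySem.List.enumerate xs)
      = (((List.foldl stepB ((-1 : Int), (-1 : Int), (0 : Int)) (PySem.List.enumerate xs)).2.2),
         dictOf (List.foldl stepB ((-1 : Int), (-1 : Int), (0 : Int)) (PySem.List.enumerate xs)).1,
         rOf (xs.length : Int)
           (List.foldl stepB ((-1 : Int), (-1 : Int), (0 : Int)) (PySem.List.enumerate xs)).1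
           (List.foldl stepB ((-1 : Int), (-1 : Int), (0 : Int)) (PySem.List.enumerate xs)).2.1
           (List.foldl stepB ((-1 : Int), (-1 : Int), (0 : Int)) (PySem.List.enumerate xs)).2.2))
    ∧ ((List.foldl stepB ((-1 : Int), (-1 : Int), (0 : Int)) (PySem.List.enumerate xs)).2.2 = 0
        ∨ (List.foldl stepB ((-1 : Int), (-1 : Int), (0 : Int)) (PySem.List.enumerate xs)).2.2 = 1)
    ∧ ((List.foldl stepB ((-1 : Int), (-1 : Int), (0 : Int)) (PySem.List.enumerate xs)).1 = -1
        → (List.foldl stepB ((-1 : Int), (-1 : Int), (0 : Int)) (PySem.List.enumerate xs)).2.2 = 0)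
    ∧ ((List.foldl stepB ((-1 : Int), (-1 : Int), (0 : Int)) (PySem.List.enumerate xs)).1 ≠ -1
        → 0 ≤ (List.foldl stepB ((-1 : Int), (-1 : Int), (0 : Int)) (PySem.List.enumerate xs)).1
          ∧ (List.foldl stepB ((-1 : Int), (-1 : Int), (0 : Int)) (PySem.List.enumerate xs)).1
              ≤ (List.foldl stepB ((-1 : Int), (-1 : Int), (0 : Int)) (PySem.List.enumerate xs)).2.1
          ∧ (List.foldl stepB ((-1 : Int), (-1 : Int), (0 : Int)) (PySem.List.enumerate xs)).2.1
              < (xs.length : Int)) := by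
  induction xs using List.reverseRecOn with
  | nil =>
      refine ⟨?_, Or.inl rfl, fun _ => rfl, fun h => absurd rfl h⟩
      simp [dictOf, rOf]
  | append_singleton xs x ih =>
      obtain ⟨hA, hp, hf0, hfr⟩ := ih
      have h2 : (0:Int) < 2 := by norm_num
      have hx : PySem.Int.mod x 2 = 0 ∨ PySem.Int.mod x 2 = 1 := by
        rw [PySem.Int.mod_eq_emod_of_pos h2]; omega
      set sb := List.foldl stepB ((-1:Int), (-1:Int), (0:Int)) (PySem.List.enumerate xs) with hsb
      simp only [PySem.List.enumerate_append, PySem.List.enumerate_cons,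
        PySem.List.enumerate_nil, List.foldl_append, List.foldl_cons, List.foldl_nil,
        List.length_append, List.length_cons, List.length_nil]
      rw [hA]
      have hn0 : (0:Int) ≤ (xs.length : Int) := by positivity
      rcases hx with hx | hx
      · -- x even: B's state is unchanged
        have hsB : stepB sb (0 + (xs.length:Int), x) = sb := by
          simp only [stepB, hx]; norm_num
        rw [hsB]
        have hpp : PySem.Int.mod (sb.2.2 + x) 2 = sb.2.2 := by
          rw [PySem.Int.mod_eq_emod_of_pos h2] at hx ⊢
          rcases hp with h | h <;> omega
        refine ⟨?_, hp, hf0, ?_⟩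
        · rcases hp with h0 | h1
          · have hc : (dictOf sb.1).contains sb.2.2 = true := by
              rw [h0]; unfold dictOf; split_ifs <;>
                simp [PySem.Dict.contains_insert]
            have hg : (dictOf sb.1).getD sb.2.2 0 = -1 := by
              rw [h0]; unfold dictOf; split_ifs <;>
                simp [PySem.Dict.getD_insert, PySem.Dict.getD_insert_self]
            simp only [stepA, hpp, hc, if_true, hg]
            refine Prod.ext rfl (Prod.ext rfl ?_)
            simp only [rOf, h0, if_pos rfl]
            simp only [max_def]; split_ifs <;> omega
          · have hfne : sb.1 ≠ -1 := by intro h; rw [hf0 h] at h1; omega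
            obtain ⟨hfge, hfl, hln⟩ := hfr hfne
            have hc : (dictOf sb.1).contains sb.2.2 = true := by
              rw [h1]; unfold dictOf; rw [if_neg hfne]
              simp [PySem.Dict.contains_insert]
            have hg : (dictOf sb.1).getD sb.2.2 0 = sb.1 := by
              rw [h1]; unfold dictOf; rw [if_neg hfne]
              simp [PySem.Dict.getD_insert_self]
            simp only [stepA, hpp, hc, if_true, hg]
            refine Prod.ext rfl (Prod.ext rfl ?_)
            simp only [rOf, h1, if_neg (by omega : (1:Int) ≠ 0)]
            simp only [max_def]; split_ifs <;> omega
        · intro hfne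
          obtain ⟨hfge, hfl, hln⟩ := hfr hfne
          exact ⟨hfge, hfl, by push_cast; omega⟩
      · -- x odd: B toggles parity, updates first/last odd
        have hsB : stepB sb (0 + (xs.length:Int), x) =
            ((if sb.1 = -1 then 0 + (xs.length:Int) else sb.1), 0 + (xs.length:Int), 1 - sb.2.2) := by
          simp only [stepB, hx]; norm_num
        rw [hsB]
        rcases hp with h0 | h1
        · -- parity was 0, becomes 1
          have hpp : PySem.Int.mod ((0:Int) + x) 2 = 1 := by
            rw [PySem.Int.mod_eq_emod_of_pos h2] at hx ⊢; omega
          by_cases hfm : sb.1 = -1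
          · -- no odd seen before: A inserts key 1
            rw [hfm, h0]
            have hnm : ¬ ((0:Int) + (xs.length:Int) = -1) := by omega
            have hc : (dictOf (-1)).contains (1:Int) = false := by decide
            refine ⟨?_, by norm_num, by intro h; rw [if_pos rfl] at h; omega, ?_⟩
            · simp only [stepA, hpp, hc, Bool.false_eq_true, if_false, if_pos rfl]
              refine Prod.ext (by norm_num) (Prod.ext ?_ ?_)
              · simp [dictOf, hnm]
              · simp only [rOf]
                norm_num [max_def]
            · intro _
              refine ⟨?_, ?_, ?_⟩ <;> simp only [if_pos rfl] <;> push_cast <;> omega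
          · -- an odd was seen before: key 1 is present with value sb.1
            obtain ⟨hfge, hfl, hln⟩ := hfr hfm
            rw [h0]
            have hc : (dictOf sb.1).contains (1:Int) = true := by
              unfold dictOf; rw [if_neg hfm]
              simp [PySem.Dict.contains_insert]
            have hg : (dictOf sb.1).getD (1:Int) 0 = sb.1 := by
              unfold dictOf; rw [if_neg hfm]
              rw [PySem.Dict.getD_insert_self]
            refine ⟨?_, by norm_num, ?_, ?_⟩
            · simp only [stepA, hpp, hc, if_true, hg, if_neg hfm]
              refine Prod.ext (by norm_num) (Prod.ext rfl ?_)
              simp only [rOf]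
              norm_num [max_def]
              split_ifs <;> push_cast <;> omega
            · intro h; exact absurd h (by simp only [if_neg hfm]; exact hfm)
            · intro _
              refine ⟨?_, ?_, ?_⟩ <;> simp only [if_neg hfm] <;> push_cast <;> omega
        · -- parity was 1, becomes 0: key 0 is present with value -1
          have hfne : sb.1 ≠ -1 := by intro h; rw [hf0 h] at h1; omega
          obtain ⟨hfge, hfl, hln⟩ := hfr hfne
          rw [h1]
          have hpp : PySem.Int.mod ((1:Int) + x) 2 = 0 := by
            rw [PySem.Int.mod_eq_emod_of_pos h2] at hx ⊢; omega
          have hc : (dictOf sb.1).contains (0:Int) = true := by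
            unfold dictOf; rw [if_neg hfne]
            simp [PySem.Dict.contains_insert]
          have hg : (dictOf sb.1).getD (0:Int) 0 = -1 := by
            unfold dictOf; rw [if_neg hfne]
            rw [PySem.Dict.getD_insert]
            norm_num [PySem.Dict.getD_insert_self]
          refine ⟨?_, by norm_num, ?_, ?_⟩
          · simp only [stepA, hpp, hc, if_true, hg, if_neg hfne]
            refine Prod.ext (by norm_num) (Prod.ext rfl ?_)
            simp only [rOf]
            norm_num [max_def]
            split_ifs <;> push_cast <;> omega
          · intro h; exact absurd h (by simp only [if_neg hfne]; exact hfne)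
          · intro _
            refine ⟨?_, ?_, ?_⟩ <;> simp only [if_neg hfne] <;> push_cast <;> omega

-- ===== VERDICT (by name: the statement is the Claim_ definition above) =====
theorem longest_even_sum_subarray_spec : Claim_equal_longest_even_sum_subarray := by
  intro nums _
  unfold Spec_longest_even_sum_subarray longest_even_sum_subarray longest_even_sum_subarray_alt
  have h := (main_inv nums).1
  rw [h]
  simp [rOf]
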